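-- pv_equiv track=rewrite | github.com/yxlao/Open3D | examples/Cuda/preprocess_tum.py | associate
-- ===== SOURCE A (Python) =====
-- def associate(first_dict, second_dict, offset, max_difference):
--     """
--     Associate two dictionaries of (stamp,data). As the time stamps never match exactly, we aim
--     to find the closest match for every input tuple.
--
--     Input:
--     first_list -- first dictionary of (stamp,data) tuples
--     second_list -- second dictionary of (stamp,data) tuples
--     offset -- time offset between both dictionaries (e.g., to model the delay between the sensors)
--     max_difference -- search radius for candidate generation
--
--     Output:
--     matches -- list of matched tuples ((stamp1,data1),(stamp2,data2))
--
--     """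
--     first_keys = list(first_dict.keys())
--     second_keys = list(second_dict.keys())
--     potential_matches = [(abs(a - (b + offset)), a, b)
--                          for a in first_keys
--                          for b in second_keys
--                          if abs(a - (b + offset)) < max_difference]
--     potential_matches.sort()
--     matches = []
--     for diff, a, b in potential_matches:
--         if a in first_keys and b in second_keys:
--             first_keys.remove(a)
--             second_keys.remove(b)
--             matches.append((a, b))
--
--     matches.sort()
--     return matches
-- ===== SOURCE B (Python) =====
-- def _bisect_left(xs, v):
--     lo, hi = 0, len(xs)
--     while lo < hi:
--         mid = (lo + hi) // 2
--         if xs[mid] < v: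
--             lo = mid + 1
--         else:
--             hi = mid
--     return lo
--
--
-- def _bisect_right(xs, v):
--     lo, hi = 0, len(xs)
--     while lo < hi:
--         mid = (lo + hi) // 2
--         if v < xs[mid]:
--             hi = mid
--         else:
--             lo = mid + 1
--     return lo
--
--
-- def _candidates(first_keys, second_keys, offset, max_difference):
--     # per sorted key a, its candidate b's are a contiguous slice found by binary search
--     out = []
--     for a in first_keys:
--         lo = _bisect_right(second_keys, a - offset - max_difference)
--         hi = _bisect_left(second_keys, a - offset + max_difference)
--         for b in second_keys[lo:hi]:
--             out.append((abs(a - (b + offset)), a, b))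
--     return out
--
--
-- def _greedy(cands, second_keys):
--     # a first key is free exactly when it is not yet a key of `matched`
--     matched = {}
--     free_second = set(second_keys)
--     for _, a, b in cands:
--         if a not in matched and b in free_second:
--             matched[a] = b
--             free_second.remove(b)
--     return matched
--
--
-- def associate(first_dict, second_dict, offset, max_difference):
--     first_keys = sorted(first_dict)
--     second_keys = sorted(second_dict)
--     cands = _candidates(first_keys, second_keys, offset, max_difference)
--     cands.sort()
--     matched = _greedy(cands, second_keys)
--     # first_keys is sorted with distinct entries, so this is already in output order
--     return [(a, matched[a]) for a in first_keys if a in matched]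
-- ===== Notes on version B (the rewrite author's own statement) =====
-- stated objective: faster
-- what changed: B sorts both key lists once and builds each key's candidate window by binary search instead of scanning all n*m pairs; the greedy pass keeps a matched-dict and a free set (O(1) tests) instead of A's O(n) list 'in'/.remove scans, and the result is emitted by walking the sorted first keys through the dict, so A's final sort disappears.
import Mathlib
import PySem

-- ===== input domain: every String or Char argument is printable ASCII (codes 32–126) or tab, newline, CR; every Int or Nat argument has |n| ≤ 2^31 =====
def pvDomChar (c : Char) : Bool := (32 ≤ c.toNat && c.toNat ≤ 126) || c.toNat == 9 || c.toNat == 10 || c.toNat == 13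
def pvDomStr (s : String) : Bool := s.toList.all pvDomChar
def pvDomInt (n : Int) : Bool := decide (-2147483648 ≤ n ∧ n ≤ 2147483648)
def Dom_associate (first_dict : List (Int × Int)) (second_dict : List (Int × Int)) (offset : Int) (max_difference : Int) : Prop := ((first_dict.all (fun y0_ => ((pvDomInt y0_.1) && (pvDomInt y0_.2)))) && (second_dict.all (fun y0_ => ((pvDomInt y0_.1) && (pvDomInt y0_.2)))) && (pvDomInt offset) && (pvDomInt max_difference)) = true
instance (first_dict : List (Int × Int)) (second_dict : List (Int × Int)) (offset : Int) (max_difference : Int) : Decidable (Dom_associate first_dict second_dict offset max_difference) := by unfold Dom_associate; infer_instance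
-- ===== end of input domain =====

-- B replaces A's n*m candidate scan by binary-searched windows over sorted keys, A's O(n)
-- list membership/removal in the greedy loop by a matched-dict plus a free set, and A's final
-- sort by reading the matched-dict off the sorted first keys (objective: faster).

-- Scalar stand-in for Python's lexicographic order on the 3-tuples (diff, a, b) and the
-- 2-tuples (a, b): exact for `.sort()` on the stated domain (|keys|, |offset| ≤ 2^31, so
-- |diff| < 2^34 and the slots cannot overflow into each other).
def pvKey (t : Int × Int × Int) : Int := t.1 * 2 ^ 68 + t.2.1 * 2 ^ 34 + t.2.2
def pvKey2 (p : Int × Int) : Int := p.1 * 2 ^ 34 + p.2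

-- ===== PORT A =====
def associate (first_dict : List (Int × Int)) (second_dict : List (Int × Int)) (offset : Int) (max_difference : Int) : List (Int × Int) :=
  -- first_keys = list(first_dict.keys()); second_keys = list(second_dict.keys())
  let first_keys := PySem.List.dedup (first_dict.map (fun p => p.1))
  let second_keys := PySem.List.dedup (second_dict.map (fun p => p.1))
  -- potential_matches = [(abs(a-(b+offset)), a, b) for a in first_keys for b in second_keys if …]
  let potential_matches := first_keys.flatMap (fun a =>
    (second_keys.filter (fun b => |a - (b + offset)| < max_difference)).map
      (fun b => (|a - (b + offset)|, a, b)))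
  -- potential_matches.sort()  (3-tuple lexicographic; pvKey, see above)
  let pm := PySem.List.sorted potential_matches pvKey
  -- greedy loop mutating first_keys / second_keys / matches
  let res := pm.foldl (fun st t =>
      if st.1.contains t.2.1 && st.2.1.contains t.2.2 then
        ((PySem.List.remove? st.1 t.2.1).getD st.1,
         (PySem.List.remove? st.2.1 t.2.2).getD st.2.1,
         st.2.2 ++ [(t.2.1, t.2.2)])
      else st)
    (first_keys, second_keys, ([] : List (Int × Int)))
  -- matches.sort()  (2-tuple lexicographic; pvKey2, see above)
  PySem.List.sorted res.2.2 pvKey2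

-- ===== PORT B =====
-- _candidates: per sorted key a, its candidate b's are the slice [lo:hi] found by the two
-- textbook binary searches (_bisect_right/_bisect_left are exactly PySem.List.bisectRight/Left)
def candsB (second_keys : List Int) (offset : Int) (max_difference : Int) : List Int → List (Int × Int × Int)
  | [] => []
  | a :: rest =>
      (PySem.List.slice second_keys
          (some ((PySem.List.bisectRight second_keys (a - offset - max_difference) : Nat) : Int))
          (some ((PySem.List.bisectLeft second_keys (a - offset + max_difference) : Nat) : Int))).map
        (fun b => (|a - (b + offset)|, a, b))
      ++ candsB second_keys offset max_difference rest

-- _greedy: a first key is free exactly when it is not yet a key of `matched`; `free_second.remove(b)`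
-- runs only under the membership guard, where it is Set.discard
def greedyB : List (Int × Int × Int) → PySem.Dict Int Int → PySem.Set Int → PySem.Dict Int Int
  | [], matched, _ => matched
  | t :: rest, matched, free_second =>
      if !(PySem.Dict.contains matched t.2.1) && PySem.Set.contains free_second t.2.2 then
        greedyB rest (PySem.Dict.insert matched t.2.1 t.2.2) (PySem.Set.discard free_second t.2.2)
      else
        greedyB rest matched free_second

def associate_alt (first_dict : List (Int × Int)) (second_dict : List (Int × Int)) (offset : Int) (max_difference : Int) : List (Int × Int) :=
  -- first_keys = sorted(first_dict); second_keys = sorted(second_dict)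
  let first_keys := PySem.List.sorted (PySem.List.dedup (first_dict.map (fun p => p.1))) (fun x => x)
  let second_keys := PySem.List.sorted (PySem.List.dedup (second_dict.map (fun p => p.1))) (fun x => x)
  -- cands = _candidates(...); cands.sort()  (3-tuple lexicographic; pvKey, see above)
  let cands := PySem.List.sorted (candsB second_keys offset max_difference first_keys) pvKey
  -- matched = _greedy(cands, second_keys)
  let matched := greedyB cands PySem.Dict.empty (PySem.Set.ofList second_keys)
  -- [(a, matched[a]) for a in first_keys if a in matched]
  first_keys.filterMap (fun a => (PySem.Dict.get? matched a).map (fun b => (a, b)))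

-- ===== PRECONDITION & SPEC =====
def Spec_associate (first_dict : List (Int × Int)) (second_dict : List (Int × Int)) (offset : Int) (max_difference : Int) (out : List (Int × Int)) : Prop := out = associate_alt first_dict second_dict offset max_difference
instance (first_dict : List (Int × Int)) (second_dict : List (Int × Int)) (offset : Int) (max_difference : Int) (out : List (Int × Int)) : Decidable (Spec_associate first_dict second_dict offset max_difference out) := by unfold Spec_associate; infer_instance

-- ===== CLAIM (what is proved, stated in full; the proofs are below) =====
def Claim_equal_associate : Prop := ∀ (first_dict : List (Int × Int)) (second_dict : List (Int × Int)) (offset : Int) (max_difference : Int), Dom_associate first_dict second_dict offset max_difference → Spec_associate first_dict second_dict offset max_difference (associate first_dict second_dict offset max_difference)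

-- ===== LEMMAS AND PROOFS =====

-- A's greedy loop body, named for the lemmas below (definitionally the lambda in `associate`)
def stepA (st : List Int × List Int × List (Int × Int)) (t : Int × Int × Int) : List Int × List Int × List (Int × Int) :=
  if st.1.contains t.2.1 && st.2.1.contains t.2.2 then
    ((PySem.List.remove? st.1 t.2.1).getD st.1,
     (PySem.List.remove? st.2.1 t.2.2).getD st.2.1,
     st.2.2 ++ [(t.2.1, t.2.2)])
  else st

-- a filter that holds exactly on the index window [lo, hi) is a take/drop
theorem pv_filter_eq_take_drop {α : Type} (p : α → Bool) :
    ∀ (xs : List α) (lo hi : Nat),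
      (∀ (j : Nat) (hj : j < xs.length), p xs[j] = true ↔ (lo ≤ j ∧ j < hi)) →
      xs.filter p = (xs.drop lo).take (hi - lo) := by
  intro xs
  induction xs with
  | nil => intro lo hi _; simp
  | cons x tl ih =>
    intro lo hi h
    have h0 := h 0 (by simp)
    have htl : ∀ (j : Nat) (hj : j < tl.length),
        p tl[j] = true ↔ (lo - 1 ≤ j ∧ j < hi - 1) := by
      intro j hj
      have := h (j + 1) (by simpa using Nat.succ_lt_succ hj)
      simpa using (this.trans (by omega))
    have ihtl := ih (lo - 1) (hi - 1) htl
    by_cases hp : p x = true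
    · have hlo : lo = 0 ∧ 0 < hi := by
        have := h0.mp hp; omega
      obtain ⟨hl, hh⟩ := hlo
      subst hl
      simp only [List.filter_cons, hp, List.drop_zero]
      rw [ihtl]
      cases hi with
      | zero => omega
      | succ k => simp [List.take_succ_cons]
    · have hnot : ¬ (lo ≤ 0 ∧ 0 < hi) := fun hc => hp (h0.mpr hc)
      simp only [List.filter_cons, hp]
      rw [ihtl]
      by_cases hhi : hi = 0
      · subst hhi; simp
      · have hlo1 : 1 ≤ lo := by omega
        have hd : (x :: tl).drop lo = tl.drop (lo - 1) := by
          cases lo with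
          | zero => omega
          | succ k => simp
        rw [hd]
        have heq : hi - 1 - (lo - 1) = hi - lo := by omega
        rw [heq]
        simp

-- on a sorted list, the bisect window [bisectRight L, bisectLeft U) is the filter L < b < U
theorem pv_window (xs : List Int) (hs : xs.Pairwise (· ≤ ·)) (L U : Int)
    (q : Int → Bool) (hq : ∀ b, q b = true ↔ (L < b ∧ b < U)) :
    PySem.List.slice xs (some ((PySem.List.bisectRight xs L : Nat) : Int))
      (some ((PySem.List.bisectLeft xs U : Nat) : Int)) = xs.filter q := by
  obtain ⟨hr0, hr1, hr2⟩ := PySem.List.bisectRight_spec xs L hs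
  obtain ⟨hl0, hl1, hl2⟩ := PySem.List.bisectLeft_spec xs U hs
  rw [PySem.List.slice_natCast]
  rw [pv_filter_eq_take_drop q xs (PySem.List.bisectRight xs L) (PySem.List.bisectLeft xs U) ?_]
  intro j hj
  rw [hq]
  constructor
  · rintro ⟨h1, h2⟩
    constructor
    · by_contra hc
      exact absurd (hr1 j hj (by omega)) (by omega)
    · by_contra hc
      exact absurd (hl2 j hj (by omega)) (by omega)
  · rintro ⟨h1, h2⟩
    exact ⟨hr2 j hj h1, hl1 j hj h2⟩

-- B's candidate builder, on a sorted second list, is A's comprehension restricted to sorted keys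
theorem pv_cands (sk : List Int) (offset md : Int) (hs : sk.Pairwise (· ≤ ·)) :
    ∀ l : List Int, candsB sk offset md l
      = l.flatMap (fun a =>
          (sk.filter (fun b => |a - (b + offset)| < md)).map
            (fun b => (|a - (b + offset)|, a, b))) := by
  intro l
  induction l with
  | nil => rfl
  | cons a rest ih =>
    simp only [candsB, List.flatMap_cons, ih]
    congr 1
    rw [pv_window sk hs (a - offset - md) (a - offset + md)
      (fun b => |a - (b + offset)| < md) ?_]
    intro b
    rw [decide_eq_true_eq, abs_lt]
    omega

-- pvKey is injective on triples whose slots obey the Dom bounds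
theorem pv_key_inj (t u : Int × Int × Int)
    (hbt : 0 ≤ t.1 ∧ t.1 ≤ 3 * 2 ^ 31 ∧ -(2:Int) ^ 31 ≤ t.2.1 ∧ t.2.1 ≤ 2 ^ 31 ∧ -(2:Int) ^ 31 ≤ t.2.2 ∧ t.2.2 ≤ 2 ^ 31)
    (hbu : 0 ≤ u.1 ∧ u.1 ≤ 3 * 2 ^ 31 ∧ -(2:Int) ^ 31 ≤ u.2.1 ∧ u.2.1 ≤ 2 ^ 31 ∧ -(2:Int) ^ 31 ≤ u.2.2 ∧ u.2.2 ≤ 2 ^ 31)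
    (h : pvKey t = pvKey u) : t = u := by
  obtain ⟨d1, a1, b1⟩ := t
  obtain ⟨d2, a2, b2⟩ := u
  simp only [pvKey] at h
  simp only at hbt hbu
  have : d1 = d2 ∧ a1 = a2 ∧ b1 = b2 := by omega
  simp [this.1, this.2.1, this.2.2]

-- the two greedy passes simulate each other: B's matched-dict items are exactly A's matches
-- list, whose keys stay distinct and whose entries all come from the candidate stream
theorem pv_greedy :
    ∀ (cs : List (Int × Int × Int)) (AK fkA skA : List Int)
      (matched : PySem.Dict Int Int) (free2 : PySem.Set Int) (ms : List (Int × Int)),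
      fkA.Nodup → skA.Nodup → skA.Perm free2 → matched.items = ms →
      (∀ t ∈ cs, t.2.1 ∈ AK) →
      (∀ a : Int, a ∈ fkA ↔ a ∈ AK ∧ a ∉ ms.map Prod.fst) →
      (ms.map Prod.fst).Nodup →
      (greedyB cs matched free2).items = (cs.foldl stepA (fkA, skA, ms)).2.2
      ∧ (((cs.foldl stepA (fkA, skA, ms)).2.2).map Prod.fst).Nodup
      ∧ (∀ p ∈ (cs.foldl stepA (fkA, skA, ms)).2.2,
           p ∈ ms ∨ ∃ t ∈ cs, p.1 = t.2.1 ∧ p.2 = t.2.2) := by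
  intro cs
  induction cs with
  | nil =>
    intro AK fkA skA matched free2 ms _ _ _ hd _ _ hnd
    refine ⟨hd, hnd, ?_⟩
    intro p hp; exact Or.inl hp
  | cons t rest ih =>
    intro AK fkA skA matched free2 ms hnf hns hperm hd hcs hinv hnd
    have hkeys : matched.keys = ms.map Prod.fst := by
      have : matched.keys = matched.items.map Prod.fst := rfl
      rw [this, hd]
    have haAK : t.2.1 ∈ AK := hcs t (by simp)
    -- the two loop conditions coincide
    have hcont : PySem.Dict.contains matched t.2.1 = true ↔ t.2.1 ∈ ms.map Prod.fst := by
      rw [PySem.Dict.contains_iff_mem_keys, hkeys]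
    have hc1 : fkA.contains t.2.1 = !(PySem.Dict.contains matched t.2.1) := by
      cases hmc : PySem.Dict.contains matched t.2.1 with
      | true =>
        have hnot : t.2.1 ∉ fkA := fun hf => ((hinv _).mp hf).2 (hcont.mp hmc)
        simp [hnot]
      | false =>
        have hm : t.2.1 ∉ ms.map Prod.fst := fun h => by
          rw [hcont.mpr h] at hmc; cases hmc
        have hf : t.2.1 ∈ fkA := (hinv _).mpr ⟨haAK, hm⟩
        simp [hf]
    have hc2 : skA.contains t.2.2 = PySem.Set.contains free2 t.2.2 := by
      rw [PySem.Set.contains_eq_listContains, hperm.contains_eq]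
    simp only [List.foldl_cons, greedyB]
    by_cases hcond : (fkA.contains t.2.1 && skA.contains t.2.2) = true
    · obtain ⟨hcA, hcB⟩ := Bool.and_eq_true_iff.mp hcond
      have hm1 : t.2.1 ∈ fkA := List.mem_of_elem_eq_true (by simpa using hcA)
      have hm2 : t.2.2 ∈ skA := List.mem_of_elem_eq_true (by simpa using hcB)
      have hnotkey : t.2.1 ∉ ms.map Prod.fst := ((hinv t.2.1).mp hm1).2
      rw [if_pos (by rw [← hc1, ← hc2]; exact hcond)]
      have hstep : stepA (fkA, skA, ms) t
          = (fkA.erase t.2.1, skA.erase t.2.2, ms ++ [(t.2.1, t.2.2)]) := by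
        simp only [stepA, hcond, if_pos]
        rw [PySem.List.remove?_eq_some_erase fkA t.2.1 hm1,
          PySem.List.remove?_eq_some_erase skA t.2.2 hm2]
        rfl
      rw [hstep]
      have hd' : (PySem.Dict.insert matched t.2.1 t.2.2).items = ms ++ [(t.2.1, t.2.2)] := by
        rw [PySem.Dict.items_insert_of_not_contains matched t.2.2 ?_, hd]
        rw [← Bool.not_eq_true, PySem.Dict.contains_iff_mem_keys, hkeys]
        exact hnotkey
      have hdisc : PySem.Set.discard free2 t.2.2 = (free2 : List Int).erase t.2.2 := by
        rw [(hperm.nodup hns).erase_eq_filter t.2.2]; rfl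
      have hinv' : ∀ a : Int, a ∈ fkA.erase t.2.1
          ↔ a ∈ AK ∧ a ∉ (ms ++ [(t.2.1, t.2.2)]).map Prod.fst := by
        intro a
        rw [hnf.mem_erase_iff, hinv]
        simp only [List.map_append, List.map_cons, List.map_nil, List.mem_append,
          List.mem_singleton]
        constructor
        · rintro ⟨hne, hAK', hnm⟩
          exact ⟨hAK', by simp [hnm, hne]⟩
        · rintro ⟨hAK', hnm⟩
          refine ⟨fun he => hnm (Or.inr (by simp [he])), hAK', fun hm => hnm (Or.inl hm)⟩
      have hnd' : ((ms ++ [(t.2.1, t.2.2)]).map Prod.fst).Nodup := by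
        simp only [List.map_append, List.map_cons, List.map_nil]
        simp only [List.nodup_append, hnd, List.nodup_singleton, true_and]
        intro a ha b hb heq
        have hb' : b = t.2.1 := List.mem_singleton.mp hb
        exact hnotkey (hb' ▸ heq ▸ ha)
      obtain ⟨ih1, ih2, ih3⟩ := ih AK (fkA.erase t.2.1) (skA.erase t.2.2)
        (PySem.Dict.insert matched t.2.1 t.2.2) (PySem.Set.discard free2 t.2.2)
        (ms ++ [(t.2.1, t.2.2)]) (hnf.erase _) (hns.erase _)
        (by rw [hdisc]; exact hperm.erase _) hd'
        (fun u hu => hcs u (by simp [hu])) hinv' hnd'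
      refine ⟨ih1, ih2, ?_⟩
      intro p hp
      rcases ih3 p hp with hms | ⟨u, hu, h1, h2⟩
      · rcases List.mem_append.mp hms with h | h
        · exact Or.inl h
        · exact Or.inr ⟨t, by simp, by simpa using congrArg Prod.fst (List.mem_singleton.mp h),
            by simpa using congrArg Prod.snd (List.mem_singleton.mp h)⟩
      · exact Or.inr ⟨u, by simp [hu], h1, h2⟩
    · rw [if_neg (by rw [← hc1, ← hc2]; exact hcond)]
      have hstep : stepA (fkA, skA, ms) t = (fkA, skA, ms) := by
        simp only [stepA, hcond]; rfl
      rw [hstep]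
      obtain ⟨ih1, ih2, ih3⟩ := ih AK fkA skA matched free2 ms hnf hns hperm hd
        (fun u hu => hcs u (by simp [hu])) hinv hnd
      refine ⟨ih1, ih2, ?_⟩
      intro p hp
      rcases ih3 p hp with h | ⟨u, hu, h1, h2⟩
      · exact Or.inl h
      · exact Or.inr ⟨u, by simp [hu], h1, h2⟩

-- reading a nodup-keyed dict off a strictly sorted key list IS sorting its items by pvKey2
theorem pv_final (fk : List Int) (d : PySem.Dict Int Int) (ms : List (Int × Int))
    (hd : d.items = ms) (hfk : fk.Pairwise (· < ·)) (hnd : (ms.map Prod.fst).Nodup)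
    (hmem : ∀ p ∈ ms, p.1 ∈ fk ∧ -(2:Int) ^ 31 ≤ p.2 ∧ p.2 ≤ 2 ^ 31) :
    PySem.List.sorted ms pvKey2
      = fk.filterMap (fun a => (PySem.Dict.get? d a).map (fun b => (a, b))) := by
  have hk : d.keys.Nodup := by
    have : d.keys = d.items.map Prod.fst := rfl
    rw [this, hd]; exact hnd
  have hget : ∀ a b : Int, PySem.Dict.get? d a = some b ↔ (a, b) ∈ ms := by
    intro a b
    rw [PySem.Dict.get?_eq_some_iff_mem_items d a b hk, hd]
  set L := fk.filterMap (fun a => (PySem.Dict.get? d a).map (fun b => (a, b))) with hL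
  have hmemL : ∀ p : Int × Int, p ∈ L ↔ p ∈ ms := by
    intro p
    rw [hL, List.mem_filterMap]
    constructor
    · rintro ⟨a, ha, hfa⟩
      obtain ⟨b, hb, rfl⟩ := Option.map_eq_some_iff.mp hfa
      exact (hget a b).mp hb
    · intro hp
      refine ⟨p.1, (hmem p hp).1, ?_⟩
      rw [(show (PySem.Dict.get? d p.1) = some p.2 from (hget p.1 p.2).mpr (by simpa using hp))]
      rfl
  have hpairL : L.Pairwise (fun p q => pvKey2 p < pvKey2 q) := by
    rw [hL, List.pairwise_filterMap]
    refine hfk.imp_of_mem ?_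
    intro a a' _ _ hlt p hp q hq
    obtain ⟨b, hb, rfl⟩ := Option.map_eq_some_iff.mp hp
    obtain ⟨b', hb', rfl⟩ := Option.map_eq_some_iff.mp hq
    have h1 := (hmem _ ((hget a b).mp hb)).2
    have h2 := (hmem _ ((hget a' b').mp hb')).2
    simp only [pvKey2]
    simp only at h1 h2
    omega
  have hndL : L.Nodup := hpairL.imp (fun h => by intro he; subst he; exact absurd h (lt_irrefl _))
  have hndms : ms.Nodup := List.Nodup.of_map Prod.fst hnd
  have hperm : L.Perm ms := (List.perm_ext_iff_of_nodup hndL hndms).mpr hmemL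
  exact PySem.List.sorted_eq_of_perm_of_pairwise_lt _ _ _ hperm hpairL

-- ===== VERDICT (by name: the statement is the Claim_ definition above) =====
theorem associate_spec : Claim_equal_associate := by
  intro fd sd offset md hdom
  simp only [Dom_associate, List.all_eq_true, Bool.and_eq_true, pvDomInt, decide_eq_true_eq] at hdom
  obtain ⟨⟨⟨hF, hS⟩, hO⟩, hM⟩ := hdom
  have hbF : ∀ a ∈ fd.map (fun p => p.1), -(2:Int) ^ 31 ≤ a ∧ a ≤ 2 ^ 31 := by
    intro a ha
    obtain ⟨p, hp, rfl⟩ := List.mem_map.mp ha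
    have := (hF p hp).1
    constructor <;> norm_num <;> omega
  have hbS : ∀ b ∈ sd.map (fun p => p.1), -(2:Int) ^ 31 ≤ b ∧ b ≤ 2 ^ 31 := by
    intro b hb
    obtain ⟨p, hp, rfl⟩ := List.mem_map.mp hb
    have := (hS p hp).1
    constructor <;> norm_num <;> omega
  show associate fd sd offset md = associate_alt fd sd offset md
  simp only [associate, associate_alt]
  rw [(rfl : (fun (st : List Int × List Int × List (Int × Int)) (t : Int × Int × Int) =>
      if st.1.contains t.2.1 && st.2.1.contains t.2.2 then
        ((PySem.List.remove? st.1 t.2.1).getD st.1,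
         (PySem.List.remove? st.2.1 t.2.2).getD st.2.1,
         st.2.2 ++ [(t.2.1, t.2.2)])
      else st) = stepA)]
  have hAKnd := PySem.List.nodup_dedup (fd.map (fun p => p.1))
  have hBKnd := PySem.List.nodup_dedup (sd.map (fun p => p.1))
  have hAKperm : (PySem.List.dedup (fd.map (fun p => p.1))).Perm
      (PySem.List.sorted (PySem.List.dedup (fd.map (fun p => p.1))) (fun x => x)) :=
    (PySem.List.sorted_perm _ _ _).symm
  have hBKperm : (PySem.List.dedup (sd.map (fun p => p.1))).Perm
      (PySem.List.sorted (PySem.List.dedup (sd.map (fun p => p.1))) (fun x => x)) :=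
    (PySem.List.sorted_perm _ _ _).symm
  set AK := PySem.List.dedup (List.map (fun p => p.1) fd) with hAK
  set BK := PySem.List.dedup (List.map (fun p => p.1) sd) with hBK
  set fkS := PySem.List.sorted AK (fun x => x) with hfkS
  set skS := PySem.List.sorted BK (fun x => x) with hskS
  rw [pv_cands skS offset md (PySem.List.sorted_pairwise _ _) fkS]
  set f := fun a => List.map (fun b => (|a - (b + offset)|, a, b))
      (List.filter (fun b => decide (|a - (b + offset)| < md)) BK) with hf
  set g := fun a => List.map (fun b => (|a - (b + offset)|, a, b))
      (List.filter (fun b => decide (|a - (b + offset)| < md)) skS) with hg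
  -- the two candidate pools are permutations of each other
  have hpm_perm : (AK.flatMap f).Perm (fkS.flatMap g) := by
    refine List.Perm.flatMap hAKperm ?_
    intro a _
    rw [hf, hg]
    exact (hBKperm.filter _).map _
  -- A's candidate pool has no duplicate triples (each (a, b) pair appears once)
  have hpm_nd : (AK.flatMap f).Nodup := by
    refine List.nodup_flatMap.mpr ⟨?_, ?_⟩
    · intro a _
      rw [hf]
      refine List.Nodup.map ?_ (hBKnd.filter _)
      intro x y hxy
      simpa using congrArg (fun t => t.2.2) hxy
    · refine hAKnd.imp ?_
      intro a b hne t hta htb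
      rw [hf] at hta htb
      simp only [List.mem_map, List.mem_filter] at hta htb
      obtain ⟨x, _, rfl⟩ := hta
      obtain ⟨y, _, hy⟩ := htb
      exact hne ((by simpa using congrArg (fun t => t.2.1) hy) : b = a).symm
  -- every candidate triple obeys the Dom bounds
  have hbound : ∀ t ∈ AK.flatMap f, 0 ≤ t.1 ∧ t.1 ≤ 3 * 2 ^ 31 ∧
      -(2:Int) ^ 31 ≤ t.2.1 ∧ t.2.1 ≤ 2 ^ 31 ∧ -(2:Int) ^ 31 ≤ t.2.2 ∧ t.2.2 ≤ 2 ^ 31 := by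
    intro t ht
    rw [hf] at ht
    simp only [List.mem_flatMap, List.mem_map, List.mem_filter] at ht
    obtain ⟨a, ha, b, ⟨hbmem, -⟩, rfl⟩ := ht
    rw [hAK] at ha
    rw [hBK] at hbmem
    have haa := hbF a ((PySem.List.mem_dedup _ _).mp ha)
    have hbb := hbS b ((PySem.List.mem_dedup _ _).mp hbmem)
    refine ⟨abs_nonneg _, ?_, haa.1, haa.2, hbb.1, hbb.2⟩
    refine abs_le.mpr ⟨by omega, by omega⟩
  -- A's sorted candidate list is strictly increasing under pvKey
  have hstrict : (PySem.List.sorted (AK.flatMap f) pvKey).Pairwise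
      (fun t u => pvKey t < pvKey u) := by
    have hnd : (PySem.List.sorted (AK.flatMap f) pvKey).Nodup :=
      (PySem.List.sorted_perm _ pvKey false).symm.nodup hpm_nd
    refine List.Pairwise.imp_of_mem ?_ ((PySem.List.sorted_pairwise _ pvKey).and hnd)
    intro t u ht hu hh
    rcases lt_or_eq_of_le hh.1 with hlt | heq
    · exact hlt
    · exact absurd (pv_key_inj t u
        (by simpa using hbound t (((PySem.List.sorted_perm _ pvKey false).mem_iff).mp ht))
        (by simpa using hbound u (((PySem.List.sorted_perm _ pvKey false).mem_iff).mp hu))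
        heq) hh.2
  -- hence the two sorted candidate lists coincide
  have hsorteq : PySem.List.sorted (fkS.flatMap g) pvKey
      = PySem.List.sorted (AK.flatMap f) pvKey :=
    PySem.List.sorted_eq_of_perm_of_pairwise_lt _ _ pvKey
      ((PySem.List.sorted_perm _ pvKey false).trans hpm_perm) hstrict
  rw [hsorteq]
  set P := PySem.List.sorted (AK.flatMap f) pvKey with hP
  have hPmem : ∀ t ∈ P, t ∈ AK.flatMap f := by
    intro t ht
    exact ((PySem.List.sorted_perm _ pvKey false).mem_iff).mp ht
  -- run the greedy simulation
  obtain ⟨h1, h2, h3⟩ := pv_greedy P AK AK BK PySem.Dict.empty (PySem.Set.ofList skS) []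
    hAKnd hBKnd
    (by
      have : PySem.Set.ofList skS = skS :=
        PySem.Set.ofList_eq_self_of_nodup _ (hBKperm.nodup hBKnd)
      rw [this]; exact hBKperm)
    rfl
    (by
      intro t ht
      obtain ⟨a, ha, hta⟩ := List.mem_flatMap.mp (hPmem t ht)
      rw [hf] at hta
      simp only [List.mem_map, List.mem_filter] at hta
      obtain ⟨b, -, rfl⟩ := hta
      exact ha)
    (by intro a; simp)
    (by simp)
  -- finish with the dict-readout characterisation
  refine pv_final fkS _ _ h1 ?_ h2 ?_
  · rw [hfkS, hAK]
    rw [PySem.List.dedup_eq_ofList]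
    exact PySem.List.sorted_ofList_pairwise_lt _
  · intro p hp
    rcases h3 p hp with h | ⟨t, ht, hp1, hp2⟩
    · simp at h
    · have htf := hbound t (hPmem t ht)
      have haAK : t.2.1 ∈ AK := by
        obtain ⟨a, ha, hta⟩ := List.mem_flatMap.mp (hPmem t ht)
        rw [hf] at hta
        simp only [List.mem_map, List.mem_filter] at hta
        obtain ⟨b, -, rfl⟩ := hta
        exact ha
      refine ⟨?_, ?_, ?_⟩
      · rw [hp1, hfkS]
        exact (PySem.List.mem_sorted _ _ _ _).mpr haAK
      · rw [hp2]; exact htf.2.2.2.2.1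
      · rw [hp2]; exact htf.2.2.2.2.2
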